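-- pv_equiv track=rewrite | github.com/rebeccajohnson88/sharing_ml_landlord | utils/postgres_functions.py | return_split_dates
-- ===== SOURCE A (Python) =====
-- def return_split_dates(tables_available):
--    split_tables = [table.split("_") for table in tables_available]
--    all_split_dates = []
--    for item in split_tables:
--        for subitem in item:
--            if subitem.isdigit() and subitem not in all_split_dates:
--                all_split_dates.append(subitem)
--            else:
--                pass
--    all_split_dates.sort()
--    return(all_split_dates)
-- ===== SOURCE B (Python) =====
-- def return_split_dates(tables_available):
--     # Sort-then-collapse: gather all digit tokens WITH duplicates, sort once,
--     # then one linear pass keeps the first element of each run of equal values.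
--     flat = [tok for table in tables_available for tok in table.split("_") if tok.isdigit()]
--     flat.sort()
--     uniq = []
--     for tok in flat:
--         if not uniq or uniq[-1] != tok:
--             uniq.append(tok)
--     return uniq
-- ===== Notes on version B (the rewrite author's own statement) =====
-- stated objective: faster
-- what changed: Replaces A's per-token linear membership scan of the growing accumulator (dedup before sort) by collecting all digit tokens with duplicates, sorting once, and deduplicating in a single pass by comparing each token with the last kept one.
import Mathlib
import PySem

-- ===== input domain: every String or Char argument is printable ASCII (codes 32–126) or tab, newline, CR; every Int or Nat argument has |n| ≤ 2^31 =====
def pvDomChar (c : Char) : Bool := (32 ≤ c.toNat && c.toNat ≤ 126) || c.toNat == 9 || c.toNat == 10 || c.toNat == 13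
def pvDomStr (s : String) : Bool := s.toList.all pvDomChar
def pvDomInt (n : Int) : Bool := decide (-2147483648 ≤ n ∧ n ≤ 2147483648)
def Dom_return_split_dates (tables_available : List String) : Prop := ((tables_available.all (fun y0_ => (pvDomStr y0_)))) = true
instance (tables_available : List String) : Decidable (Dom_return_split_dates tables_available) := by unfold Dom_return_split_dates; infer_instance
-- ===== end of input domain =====

-- B replaces A's per-token membership scan of the accumulator by sort-then-adjacent-collapse (faster in a timing run).

-- shared helper: table.split("_"); the separator "_" is a nonempty literal, so Str.split? is always `some`
def pySplitUnd (s : String) : List String := (PySem.Str.split? s "_").getD []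

-- ===== PORT A =====
-- loop body of A's inner for-loop
def stepA (acc : List String) (s : String) : List String :=
  if PySem.Str.strIsdigit s && !(acc.contains s) then acc ++ [s] else acc

def return_split_dates (tables_available : List String) : List String :=
  let split_tables := tables_available.map (fun table => pySplitUnd table)
  let all_split_dates := split_tables.foldl (fun acc item => item.foldl (fun a subitem => stepA a subitem) acc) []
  PySem.List.sorted all_split_dates (fun x => x) false

-- ===== PORT B =====
-- loop body of B's collapse loop: `if not uniq or uniq[-1] != tok: uniq.append(tok)`
def stepB (uniq : List String) (tok : String) : List String :=
  if uniq.isEmpty || (PySem.List.pyGetD uniq (-1) "" != tok) then uniq ++ [tok] else uniq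

def return_split_dates_alt (tables_available : List String) : List String :=
  let flat := (tables_available.flatMap (fun table => pySplitUnd table)).filter
      (fun tok => PySem.Str.strIsdigit tok)
  let flatSorted := PySem.List.sorted flat (fun x => x) false
  flatSorted.foldl (fun uniq tok => stepB uniq tok) []

-- ===== PRECONDITION & SPEC =====
def Spec_return_split_dates (tables_available : List String) (out : List String) : Prop := out = return_split_dates_alt tables_available
instance (tables_available : List String) (out : List String) : Decidable (Spec_return_split_dates tables_available out) := by unfold Spec_return_split_dates; infer_instance

-- ===== CLAIM (what is proved, stated in full; the proofs are below) =====
def Claim_equal_return_split_dates : Prop := ∀ (tables_available : List String), Dom_return_split_dates tables_available → Spec_return_split_dates tables_available (return_split_dates tables_available)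

-- ===== LEMMAS AND PROOFS =====

-- A's accumulator loop: keeps exactly the digit tokens, without duplicates
theorem afold_spec (toks : List String) (acc : List String) (h : acc.Nodup) :
    (toks.foldl stepA acc).Nodup ∧
      (∀ x, x ∈ toks.foldl stepA acc ↔ x ∈ acc ∨ (x ∈ toks ∧ PySem.Str.strIsdigit x = true)) := by
  induction toks generalizing acc with
  | nil => simp [h]
  | cons t toks ih =>
    simp only [List.foldl_cons]
    by_cases hc : PySem.Str.strIsdigit t = true ∧ t ∉ acc
    · have hcont : acc.contains t = false :=
        Bool.eq_false_iff.mpr (fun h' => hc.2 (List.contains_iff_mem.mp h'))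
      have hstep : stepA acc t = acc ++ [t] := by
        simp only [stepA, hc.1, hcont, Bool.not_false, Bool.and_self, if_true]
      have hnd : (acc ++ [t]).Nodup := by
        simp [List.nodup_append, h]
        intro a ha rfl
        exact hc.2 ha
      obtain ⟨h1, h2⟩ := ih (acc ++ [t]) hnd
      rw [hstep]
      refine ⟨h1, fun x => ?_⟩
      rw [h2 x]
      simp only [List.mem_append, List.mem_cons, List.not_mem_nil, or_false]
      constructor
      · rintro (⟨hx | rfl⟩ | ⟨hx, hd⟩)
        · exact Or.inl hx
        · exact Or.inr ⟨Or.inl rfl, hc.1⟩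
        · exact Or.inr ⟨Or.inr hx, hd⟩
      · rintro (hx | ⟨rfl | hx, hd⟩)
        · exact Or.inl (Or.inl hx)
        · exact Or.inl (Or.inr rfl)
        · exact Or.inr ⟨hx, hd⟩
    · have hstep : stepA acc t = acc := by
        rcases Decidable.not_and_iff_or_not.mp hc with hd | hm
        · have hd' : PySem.Str.strIsdigit t = false := Bool.eq_false_iff.mpr hd
          simp only [stepA, hd', Bool.false_and]
          rfl
        · have hmem : t ∈ acc := Decidable.not_not.mp hm
          have hcont : acc.contains t = true := List.contains_iff_mem.mpr hmem
          simp only [stepA, hcont, Bool.not_true, Bool.and_false]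
          rfl
      obtain ⟨h1, h2⟩ := ih acc h
      rw [hstep]
      refine ⟨h1, fun x => ?_⟩
      rw [h2 x]
      simp only [List.mem_cons]
      constructor
      · rintro (hx | ⟨hx, hd⟩)
        · exact Or.inl hx
        · exact Or.inr ⟨Or.inr hx, hd⟩
      · rintro (hx | ⟨rfl | hx, hd⟩)
        · exact Or.inl hx
        · rcases Decidable.not_and_iff_or_not.mp hc with hd' | hm
          · exact absurd hd hd'
          · exact Or.inl (Decidable.not_not.mp hm)
        · exact Or.inr ⟨hx, hd⟩

theorem bfold_shift (l : List String) (acc : List String) (a : String) :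
    l.foldl stepB (acc ++ [a]) = acc ++ l.foldl stepB [a] := by
  induction l generalizing acc a with
  | nil => simp
  | cons t l ih =>
    have hlast : PySem.List.pyGetD ([a] : List String) (-1) "" = a := by
      have := PySem.List.pyGetD_neg_one_append_singleton (xs := ([] : List String)) (x := a) (d := "")
      simpa using this
    simp only [List.foldl_cons]
    by_cases hat : a = t
    · subst hat
      have h1 : stepB (acc ++ [a]) a = acc ++ [a] := by
        simp [stepB, PySem.List.pyGetD_neg_one_append_singleton]
      have h2 : stepB [a] a = [a] := by
        simp [stepB, hlast]
      rw [h1, h2, ih]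
    · have h1 : stepB (acc ++ [a]) t = (acc ++ [a]) ++ [t] := by
        simp [stepB, PySem.List.pyGetD_neg_one_append_singleton, hat]
      have h2 : stepB [a] t = [a] ++ [t] := by
        simp [stepB, hlast, hat]
      rw [h1, h2, ih (acc ++ [a]) t, ih [a] t, List.append_assoc]

theorem bfold_spec (l : List String) (a : String) (hl : l.Pairwise (· ≤ ·))
    (ha : ∀ x ∈ l, a ≤ x) :
    (l.foldl stepB [a]).Pairwise (· < ·) ∧
      (∀ x ∈ l.foldl stepB [a], a ≤ x) ∧
      (∀ x, x ∈ l.foldl stepB [a] ↔ x = a ∨ x ∈ l) := by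
  induction l generalizing a with
  | nil => simp
  | cons t l ih =>
    have hat : a ≤ t := ha t (List.mem_cons_self ..)
    have hlp : l.Pairwise (· ≤ ·) := (List.pairwise_cons.mp hl).2
    have hta : ∀ x ∈ l, t ≤ x := (List.pairwise_cons.mp hl).1
    have hlast : PySem.List.pyGetD ([a] : List String) (-1) "" = a := by
      have := PySem.List.pyGetD_neg_one_append_singleton (xs := ([] : List String)) (x := a) (d := "")
      simpa using this
    simp only [List.foldl_cons]
    by_cases heq : a = t
    · subst heq
      have h2 : stepB [a] a = [a] := by
        simp [stepB, hlast]
      rw [h2]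
      obtain ⟨p1, p2, p3⟩ := ih a hlp (fun x hx => le_trans hat (hta x hx))
      refine ⟨p1, p2, fun x => ?_⟩
      rw [p3 x]
      simp only [List.mem_cons]
      tauto
    · have h2 : stepB [a] t = [a] ++ [t] := by
        simp [stepB, hlast, heq]
      have halt : a < t := lt_of_le_of_ne hat heq
      rw [h2, bfold_shift l [a] t]
      obtain ⟨p1, p2, p3⟩ := ih t hlp hta
      refine ⟨?_, ?_, fun x => ?_⟩
      · rw [List.singleton_append, List.pairwise_cons]
        exact ⟨fun x hx => lt_of_lt_of_le halt (p2 x hx), p1⟩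
      · intro x hx
        rcases List.mem_cons.mp hx with rfl | hx
        · exact le_refl x
        · exact le_trans hat (p2 x hx)
      · rw [List.singleton_append, List.mem_cons, p3 x, List.mem_cons]

-- ===== VERDICT (by name: the statement is the Claim_ definition above) =====
theorem return_split_dates_spec : Claim_equal_return_split_dates := by
  intro tables _
  unfold Spec_return_split_dates return_split_dates return_split_dates_alt
  simp only []
  -- flatten A's nested loop into one fold over the flattened token list
  set flatToks := tables.flatMap (fun table => pySplitUnd table) with hflatdef
  have hflat : (tables.map (fun table => pySplitUnd table)).foldl
      (fun acc item => item.foldl (fun a subitem => stepA a subitem) acc) [] =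
      flatToks.foldl stepA [] := by
    rw [hflatdef, List.flatMap_def, List.foldl_flatten, List.foldl_map]
  rw [hflat]
  set flat := flatToks.filter (fun tok => PySem.Str.strIsdigit tok) with hfdef
  obtain ⟨hand, hamem⟩ := afold_spec flatToks [] List.nodup_nil
  have hamem' : ∀ x, x ∈ flatToks.foldl stepA [] ↔ x ∈ flat := by
    intro x
    rw [hamem x, hfdef, List.mem_filter]
    simp
  rcases hs : PySem.List.sorted flat (fun x => x) false with _ | ⟨a, rest⟩
  · -- no digit token at all: A's accumulator is empty too
    have hfe : flat = [] := by
      have := PySem.List.mem_sorted flat (fun x => x) false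
      rw [hs] at this
      simp at this
      exact List.eq_nil_iff_forall_not_mem.mpr this
    have hae : flatToks.foldl stepA [] = [] := by
      refine List.eq_nil_iff_forall_not_mem.mpr (fun x hx => ?_)
      rw [hamem' x, hfe] at hx
      exact absurd hx (List.not_mem_nil)
    rw [hae]
    rfl
  · -- nonempty: the sorted flat list is a :: rest
    have hpw : (a :: rest).Pairwise (fun x y => x ≤ y) := by
      have := PySem.List.sorted_pairwise flat (fun x => x)
      rwa [hs] at this
    have hrest : rest.Pairwise (· ≤ ·) := (List.pairwise_cons.mp hpw).2
    have hamin : ∀ x ∈ rest, a ≤ x := (List.pairwise_cons.mp hpw).1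
    obtain ⟨p1, _, p3⟩ := bfold_spec rest a hrest hamin
    have hseed : stepB [] a = [a] := by simp [stepB]
    have hBeq : (a :: rest).foldl stepB [] = rest.foldl stepB [a] := by
      simp only [List.foldl_cons, hseed]
    rw [hBeq]
    -- A's sorted result is named by its characteristic property
    refine PySem.List.sorted_eq_of_perm_of_pairwise_lt _ _ _ ?_ p1
    refine (List.perm_ext_iff_of_nodup ?_ hand).mpr ?_
    · exact p1.imp ne_of_lt
    · intro x
      rw [p3 x, hamem' x]
      have hms := PySem.List.mem_sorted flat (fun x => x) false x
      rw [hs] at hms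
      simp only [List.mem_cons] at hms
      tauto
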